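-- pv_equiv track=rewrite | github.com/mila125/novawin_auto | fibo.py | fibonacci_dual
-- ===== SOURCE A (Python) =====
-- def fibonacci_dual(max_x, max_y):
--     """
--     Genera dos secuencias de Fibonacci dentro de un mismo array.
--     - Elementos en índices pares corresponden a la distancia en X.
--     - Elementos en índices impares corresponden a la distancia en Y.
--
--     :param max_x: Número máximo de términos en la secuencia X.
--     :param max_y: Número máximo de términos en la secuencia Y.
--     :return: Lista con ambas secuencias intercaladas.
--     """
--     def fibonacci(n):
--         """Genera la secuencia de Fibonacci hasta n términos."""
--         if n <= 0:
--             return []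
--         fib = [0, 1]
--         for _ in range(2, n):
--             fib.append(fib[-1] + fib[-2])
--         return fib[:n]
--
--     # Obtener ambas secuencias
--     seq_x = fibonacci(max_x)
--     seq_y = fibonacci(max_y)
--
--     # Intercalar ambas secuencias en un solo array
--     resultado = []
--     i, j = 0, 0
--
--     while i < len(seq_x) or j < len(seq_y):
--         if i < len(seq_x):
--             resultado.append(seq_x[i])  # Elemento para X (posición par)
--             i += 1
--         if j < len(seq_y):
--             resultado.append(seq_y[j])  # Elemento para Y (posición impar)
--             j += 1
--
--     return resultado
-- ===== SOURCE B (Python) =====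
-- def fibonacci_dual(max_x, max_y):
--     """Fused single pass: generate and interleave with two rolling Fibonacci pairs."""
--     resultado = []
--     ax, bx = 0, 1
--     ay, by = 0, 1
--     for k in range(max(max_x, max_y)):
--         if k < max_x:
--             resultado.append(ax)
--             ax, bx = bx, ax + bx
--         if k < max_y:
--             resultado.append(ay)
--             ay, by = by, ay + by
--     return resultado
-- ===== Notes on version B (the rewrite author's own statement) =====
-- stated objective: alternative
-- what changed: B fuses generation and interleaving into a single pass that keeps only two rolling Fibonacci pairs (ax,bx) and (ay,by), instead of A's precomputing two full Fibonacci lists and then merging them with an index-based while loop.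
import Mathlib
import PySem

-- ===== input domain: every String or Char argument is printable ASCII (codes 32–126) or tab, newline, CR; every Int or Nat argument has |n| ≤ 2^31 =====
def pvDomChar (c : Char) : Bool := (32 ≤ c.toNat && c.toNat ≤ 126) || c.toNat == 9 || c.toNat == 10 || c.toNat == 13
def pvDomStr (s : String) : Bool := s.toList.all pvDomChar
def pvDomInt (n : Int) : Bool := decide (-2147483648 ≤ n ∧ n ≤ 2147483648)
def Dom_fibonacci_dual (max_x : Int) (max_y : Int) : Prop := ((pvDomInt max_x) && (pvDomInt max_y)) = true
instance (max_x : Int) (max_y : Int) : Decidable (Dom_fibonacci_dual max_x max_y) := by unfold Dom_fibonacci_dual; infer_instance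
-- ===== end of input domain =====

-- B fuses sequence generation and interleaving into one pass with two rolling Fibonacci
-- pairs, instead of A's build-two-lists-then-merge; objective: alternative decomposition.

-- ===== PORT A =====
-- inner helper fibonacci(n): list [0,1] grown by fib.append(fib[-1]+fib[-2]) over range(2,n), then fib[:n]
def pyFibHelper (n : Int) : List Int :=
  if n ≤ 0 then []
  else
    let fib := (PySem.List.pyRange 2 n 1).foldl
      (fun fib _ =>
        fib ++ [(PySem.List.pyGet? fib (-1)).getD 0 + (PySem.List.pyGet? fib (-2)).getD 0])
      ([0, 1] : List Int)
    PySem.List.slice fib none (some n)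

-- A's while loop over indices i, j: the obvious structural recursion on the two
-- remaining suffixes seq_x[i:], seq_y[j:] with resultado as the accumulated output.
def pyInterleave : List Int → List Int → List Int
  | [], ys => ys
  | x :: xs, [] => x :: pyInterleave xs []
  | x :: xs, y :: ys => x :: y :: pyInterleave xs ys

def fibonacci_dual (max_x : Int) (max_y : Int) : List Int :=
  pyInterleave (pyFibHelper max_x) (pyFibHelper max_y)

-- ===== PORT B =====
-- loop state (resultado, ax, bx, ay, by) of Source B ('by' is a Lean keyword, field named byv)
structure BState where
  res : List Int
  ax : Int
  bx : Int
  ay : Int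
  byv : Int
deriving Repr, DecidableEq

def stepB (max_x max_y : Int) (s : BState) (k : Int) : BState :=
  let s := if k < max_x then { s with res := s.res ++ [s.ax], ax := s.bx, bx := s.ax + s.bx } else s
  if k < max_y then { s with res := s.res ++ [s.ay], ay := s.byv, byv := s.ay + s.byv } else s

def fibonacci_dual_alt (max_x : Int) (max_y : Int) : List Int :=
  ((PySem.List.pyRange 0 (max max_x max_y) 1).foldl (stepB max_x max_y)
    ⟨[], 0, 1, 0, 1⟩).res

-- ===== PRECONDITION & SPEC =====
def Spec_fibonacci_dual (max_x : Int) (max_y : Int) (out : List Int) : Prop := out = fibonacci_dual_alt max_x max_y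
instance (max_x : Int) (max_y : Int) (out : List Int) : Decidable (Spec_fibonacci_dual max_x max_y out) := by unfold Spec_fibonacci_dual; infer_instance

-- ===== CLAIM (what is proved, stated in full; the proofs are below) =====
def Claim_equal_fibonacci_dual : Prop := ∀ (max_x : Int) (max_y : Int), Dom_fibonacci_dual max_x max_y → Spec_fibonacci_dual max_x max_y (fibonacci_dual max_x max_y)

-- ===== LEMMAS AND PROOFS =====

def fibZ : Nat → Int
  | 0 => 0
  | 1 => 1
  | n + 2 => fibZ n + fibZ (n + 1)

def fibsL (m : Nat) : List Int := (List.range m).map fibZ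

-- the body of A's growth loop ignores the range element
def growA (L : List Int) : List Int :=
  L ++ [(PySem.List.pyGet? L (-1)).getD 0 + (PySem.List.pyGet? L (-2)).getD 0]

theorem foldl_const_iterate (g : List Int → List Int) :
    ∀ (l : List Int) (init : List Int), l.foldl (fun acc _ => g acc) init = g^[l.length] init := by
  intro l
  induction l with
  | nil => intro init; simp
  | cons a t ih =>
      intro init
      simp [List.foldl_cons, ih, Function.iterate_succ_apply]

theorem growA_fibsL (m : Nat) : growA (fibsL (m + 2)) = fibsL (m + 3) := by
  have hlen : (fibsL (m + 2)).length = m + 2 := by simp [fibsL]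
  have h1 : PySem.List.pyGet? (fibsL (m + 2)) (-1) = some (fibZ (m + 1)) := by
    rw [PySem.List.pyGet?_neg_one]
    have : fibsL (m + 2) = fibsL (m + 1) ++ [fibZ (m + 1)] := by
      simp [fibsL, List.range_succ]
    rw [this]; simp
  have h2 : PySem.List.pyGet? (fibsL (m + 2)) (-2) = some (fibZ m) := by
    rw [PySem.List.pyGet?_neg_ofNat (fibsL (m + 2)) 2 (by omega) (by omega)]
    simp [fibsL]
  have h3 : fibsL (m + 3) = fibsL (m + 2) ++ [fibZ (m + 2)] := by
    simp [fibsL, List.range_succ]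
  rw [growA, h1, h2, h3]
  simp only [Option.getD_some, List.append_cancel_left_eq, List.cons.injEq, and_true]
  show fibZ (m + 1) + fibZ m = fibZ (m + 2)
  simp [fibZ]; omega

theorem iterate_growA (m : Nat) : growA^[m] (fibsL 2) = fibsL (m + 2) := by
  induction m with
  | zero => rfl
  | succ n ih =>
      rw [Function.iterate_succ_apply', ih, growA_fibsL]

theorem fibsL_two : fibsL 2 = [0, 1] := by decide

theorem pyFibHelper_eq (n : Int) : pyFibHelper n = fibsL n.toNat := by
  by_cases h : n ≤ 0
  · have : n.toNat = 0 := by omega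
    simp [pyFibHelper, h, this, fibsL]
  · rw [not_le] at h
    have hfold : (PySem.List.pyRange 2 n 1).foldl
        (fun fib _ =>
          fib ++ [(PySem.List.pyGet? fib (-1)).getD 0 + (PySem.List.pyGet? fib (-2)).getD 0])
        ([0, 1] : List Int) = fibsL ((n - 2).toNat + 2) := by
      have hg : (fun (fib : List Int) (_ : Int) =>
          fib ++ [(PySem.List.pyGet? fib (-1)).getD 0 + (PySem.List.pyGet? fib (-2)).getD 0])
          = fun acc _ => growA acc := by
        funext L k; rfl
      rw [hg, foldl_const_iterate growA, PySem.List.length_pyRange_one, ← fibsL_two,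
        iterate_growA]
    rw [pyFibHelper]
    simp only [h.not_ge, if_false]
    rw [hfold, PySem.List.slice_to _ (by omega : (0:Int) ≤ n)]
    have hle : n.toNat ≤ (n - 2).toNat + 2 := by omega
    simp only [fibsL]
    rw [← List.map_take, List.take_range, Nat.min_eq_left hle]

-- B-side: the fused loop from index k, with rolling pairs at position min k mx / min k my,
-- produces exactly the interleaving of the two remaining Fibonacci segments.
theorem altLoop (mx my : Int) :
    ∀ (c : Nat) (k : Int), 0 ≤ k → (max mx my - k).toNat = c → ∀ (res : List Int),
      ((PySem.List.pyRange k (max mx my) 1).foldl (stepB mx my)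
        ⟨res, fibZ (min k.toNat mx.toNat), fibZ (min k.toNat mx.toNat + 1),
              fibZ (min k.toNat my.toNat), fibZ (min k.toNat my.toNat + 1)⟩).res
      = res ++ pyInterleave
          ((List.range' (min k.toNat mx.toNat) (mx.toNat - min k.toNat mx.toNat)).map fibZ)
          ((List.range' (min k.toNat my.toNat) (my.toNat - min k.toNat my.toNat)).map fibZ) := by
  intro c
  induction c with
  | zero =>
      intro k hk hc res
      have hM : max mx my ≤ k := by omega
      have hx : min k.toNat mx.toNat = mx.toNat := by
        have : mx ≤ max mx my := le_max_left _ _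
        omega
      have hy : min k.toNat my.toNat = my.toNat := by
        have : my ≤ max mx my := le_max_right _ _
        omega
      rw [PySem.List.pyRange_one_eq_nil hM, hx, hy]
      simp [pyInterleave]
  | succ c ih =>
      intro k hk hc res
      have hkM : k < max mx my := by omega
      rw [PySem.List.pyRange_one_cons hkM, List.foldl_cons]
      have hnext : (max mx my - (k + 1)).toNat = c := by omega
      have hk1 : (0:Int) ≤ k + 1 := by omega
      by_cases hx : k < mx
      · have hkx : min k.toNat mx.toNat = k.toNat := by omega
        have hkx' : min (k + 1).toNat mx.toNat = k.toNat + 1 := by omega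
        by_cases hy : k < my
        · have hky : min k.toNat my.toNat = k.toNat := by omega
          have hky' : min (k + 1).toNat my.toNat = k.toNat + 1 := by omega
          have hstep : stepB mx my
              ⟨res, fibZ (min k.toNat mx.toNat), fibZ (min k.toNat mx.toNat + 1),
                    fibZ (min k.toNat my.toNat), fibZ (min k.toNat my.toNat + 1)⟩ k
            = ⟨res ++ [fibZ k.toNat] ++ [fibZ k.toNat],
               fibZ (min (k+1).toNat mx.toNat), fibZ (min (k+1).toNat mx.toNat + 1),
               fibZ (min (k+1).toNat my.toNat), fibZ (min (k+1).toNat my.toNat + 1)⟩ := by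
            have ht : (k + 1).toNat = k.toNat + 1 := by omega
            rw [ht] at hkx' hky'
            simp only [ht]
            simp [stepB, hx, hy, hkx, hky, hkx', hky',
              show k.toNat + 1 + 1 = k.toNat + 2 from rfl, fibZ]
          rw [hstep, ih (k+1) hk1 hnext]
          rw [hkx, hky, hkx', hky']
          have hrx : mx.toNat - k.toNat = (mx.toNat - (k.toNat + 1)) + 1 := by omega
          have hry : my.toNat - k.toNat = (my.toNat - (k.toNat + 1)) + 1 := by omega
          rw [hrx, hry, List.range'_succ, List.range'_succ]
          simp [pyInterleave]
        · have hky : min k.toNat my.toNat = my.toNat := by omega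
          have hky' : min (k + 1).toNat my.toNat = my.toNat := by omega
          have hstep : stepB mx my
              ⟨res, fibZ (min k.toNat mx.toNat), fibZ (min k.toNat mx.toNat + 1),
                    fibZ (min k.toNat my.toNat), fibZ (min k.toNat my.toNat + 1)⟩ k
            = ⟨res ++ [fibZ k.toNat],
               fibZ (min (k+1).toNat mx.toNat), fibZ (min (k+1).toNat mx.toNat + 1),
               fibZ (min (k+1).toNat my.toNat), fibZ (min (k+1).toNat my.toNat + 1)⟩ := by
            have ht : (k + 1).toNat = k.toNat + 1 := by omega
            rw [ht] at hkx' hky'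
            simp only [ht]
            simp [stepB, hx, hy, hkx, hky, hkx', hky',
              show k.toNat + 1 + 1 = k.toNat + 2 from rfl, fibZ]
          rw [hstep, ih (k+1) hk1 hnext]
          rw [hkx, hky, hkx', hky']
          have hry : my.toNat - my.toNat = 0 := by omega
          have hrx : mx.toNat - k.toNat = (mx.toNat - (k.toNat + 1)) + 1 := by omega
          rw [hry, hrx, List.range'_succ]
          cases hrest : (List.range' (k.toNat + 1) (mx.toNat - (k.toNat + 1))).map fibZ <;>
            simp [pyInterleave, hrest]
      · have hyk : k < my := by omega
        have hkx2 : min k.toNat mx.toNat = mx.toNat := by omega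
        have hkx2' : min (k + 1).toNat mx.toNat = mx.toNat := by omega
        have hky : min k.toNat my.toNat = k.toNat := by omega
        have hky' : min (k + 1).toNat my.toNat = k.toNat + 1 := by omega
        have hstep : stepB mx my
            ⟨res, fibZ (min k.toNat mx.toNat), fibZ (min k.toNat mx.toNat + 1),
                  fibZ (min k.toNat my.toNat), fibZ (min k.toNat my.toNat + 1)⟩ k
          = ⟨res ++ [fibZ k.toNat],
             fibZ (min (k+1).toNat mx.toNat), fibZ (min (k+1).toNat mx.toNat + 1),
             fibZ (min (k+1).toNat my.toNat), fibZ (min (k+1).toNat my.toNat + 1)⟩ := by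
          have ht : (k + 1).toNat = k.toNat + 1 := by omega
          rw [ht] at hkx2' hky'
          simp only [ht]
          simp [stepB, hx, hyk, hkx2, hky, hkx2', hky',
            show k.toNat + 1 + 1 = k.toNat + 2 from rfl, fibZ]
        rw [hstep, ih (k+1) hk1 hnext]
        rw [hkx2, hky, hkx2', hky']
        have hrx : mx.toNat - mx.toNat = 0 := by omega
        have hry : my.toNat - k.toNat = (my.toNat - (k.toNat + 1)) + 1 := by omega
        rw [hrx, hry, List.range'_succ]
        simp [pyInterleave]

theorem alt_eq (mx my : Int) :
    fibonacci_dual_alt mx my = pyInterleave (fibsL mx.toNat) (fibsL my.toNat) := by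
  have h := altLoop mx my (max mx my).toNat 0 le_rfl (by omega) []
  simp only [Int.toNat_zero, Nat.zero_min, Nat.sub_zero, List.nil_append] at h
  have hz : fibZ 0 = 0 := rfl
  have ho : fibZ (0 + 1) = 1 := rfl
  rw [hz, ho] at h
  rw [fibonacci_dual_alt, h]
  simp [fibsL, List.range_eq_range']

-- ===== VERDICT (by name: the statement is the Claim_ definition above) =====
theorem fibonacci_dual_spec : Claim_equal_fibonacci_dual := by
  intro mx my _
  unfold Spec_fibonacci_dual
  rw [fibonacci_dual, pyFibHelper_eq, pyFibHelper_eq, alt_eq]
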